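-- pv_equiv track=rewrite | github.com/CAPOJ/BotIP | is_right_ip.py | bitwise_multiply_ip_and_mask
-- ===== SOURCE A (Python) =====
-- def bitwise_multiply_ip_and_mask(ip_address, cidr_mask):
--     """
--     Выполняет побитовое умножение IP-адреса и маски подсети.
--
--     Args:
--         ip_address (str): IP-адрес в формате "a.b.c.d".
--         cidr_mask (str): Маска подсети в формате "/n".
--
--     Returns:
--         str: Результат побитового умножения IP-адреса и маски подсети в формате "a.b.c.d".
--     """
--     # Преобразуем IP-адрес в двоичное представление
--     ip_octets = [int(octet) for octet in ip_address.split('.')]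
--     ip_bin = ''.join(f"{octet:08b}" for octet in ip_octets)
--
--     # Извлекаем длину префикса из маски подсети
--     prefix_length = int(cidr_mask.replace('/', ''))
--
--     # Создаем маску подсети в двоичном формате
--     mask_bin = '1' * prefix_length + '0' * (32 - prefix_length)
--
--     # Выполняем побитовое умножение IP-адреса и маски подсети
--     result_bin = bin(int(ip_bin, 2) & int(mask_bin, 2))[2:]
--
--     # Добавляем ведущие нули, чтобы получить 32-битное двоичное представление
--     while len(result_bin) < 32:
--         result_bin = '0' + result_bin
--
--     # Преобразуем результат в формат "a.b.c.d"
--     result_octets = [str(int(result_bin[i:i + 8], 2)) for i in range(0, 32, 8)]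
--     result_ip = '.'.join(result_octets)
--
--     return result_ip
-- ===== SOURCE B (Python) =====
-- def bitwise_multiply_ip_and_mask(ip_address, cidr_mask):
--     """Apply the /n CIDR netmask: pure integer arithmetic, no binary strings."""
--     value = 0
--     for o in ip_address.split('.'):
--         value = value * 256 + int(o)
--     prefix = int(cidr_mask.replace('/', ''))
--     value %= 2 ** 32
--     low = 32 - prefix          # number of host bits to clear
--     if low >= 32:
--         value = 0
--     elif low > 0:
--         value -= value % 2 ** low
--     return '.'.join(str(value // 2 ** s % 256) for s in (24, 16, 8, 0))
-- ===== Notes on version B (the rewrite author's own statement) =====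
-- stated objective: alternative
-- what changed: B computes the masked address with pure integer arithmetic (fold the octets into one integer, clear the low 32-prefix bits with a modulus subtraction, extract bytes by div/mod), replacing A's pipeline of 8-bit binary text formatting, string concatenation, int(...,2) parsing, a global AND, while-loop zero padding and string slicing.
-- outside the precondition, e.g. on bitwise_multiply_ip_and_mask('1.2.3.300', '/24'): A returns '2.4.7.0', B returns '1.2.4.0'; on bitwise_multiply_ip_and_mask('1.2.3.4.5', '/40'): A returns '129.1.130.2', B returns '2.3.4.5'
import Mathlib
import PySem

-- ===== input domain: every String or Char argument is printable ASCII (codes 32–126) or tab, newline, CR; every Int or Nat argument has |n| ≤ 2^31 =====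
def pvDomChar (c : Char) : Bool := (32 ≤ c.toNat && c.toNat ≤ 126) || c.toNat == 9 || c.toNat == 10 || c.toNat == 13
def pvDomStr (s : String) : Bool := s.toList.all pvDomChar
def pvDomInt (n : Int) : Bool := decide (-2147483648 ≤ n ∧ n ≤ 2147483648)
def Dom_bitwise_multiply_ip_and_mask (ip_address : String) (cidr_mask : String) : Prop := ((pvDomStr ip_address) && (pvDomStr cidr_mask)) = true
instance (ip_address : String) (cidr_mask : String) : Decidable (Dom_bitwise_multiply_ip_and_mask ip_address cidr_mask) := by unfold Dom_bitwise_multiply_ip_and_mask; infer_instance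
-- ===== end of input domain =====

-- B replaces A's binary-string pipeline (build a 32-char bit string, parse it, AND a global
-- 32-bit integer, re-pad and re-slice the text) by one per-octet integer-arithmetic pass.

-- ===== PORT A =====

-- bin(n)[2:] for n ≥ 0 (binary digits, no leading zeros except for 0 itself)
def natBin (n : Nat) : List Char :=
  if h : n < 2 then [if n = 1 then '1' else '0']
  else natBin (n / 2) ++ [if n % 2 = 1 then '1' else '0']
  decreasing_by exact Nat.div_lt_self (by omega) (by omega)

-- f"{octet:08b}"  (width-8 zero-padded binary; exact for any Int, '-' sign kept as Python does)
def fmt08b (n : Int) : List Char :=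
  if n < 0 then '-' :: (List.replicate (7 - (natBin (-n).toNat).length) '0' ++ natBin (-n).toNat)
  else List.replicate (8 - (natBin n.toNat).length) '0' ++ natBin n.toNat

-- int(s, 2); total-guarded: exact on strings of '0'/'1' (Python raises elsewhere, outside Pre_)
def parseBin (cs : List Char) : Nat :=
  cs.foldl (fun a c => 2 * a + (if c = '1' then 1 else 0)) 0

-- the `while len(result_bin) < 32: result_bin = '0' + result_bin` loop
def padLoop (cs : List Char) : List Char :=
  if h : cs.length < 32 then padLoop ('0' :: cs) else cs
  termination_by 32 - cs.length
  decreasing_by simp; omega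

def bitwise_multiply_ip_and_mask (ip_address : String) (cidr_mask : String) : String :=
  -- ip_octets = [int(octet) for octet in ip_address.split('.')]  (int() guarded; Pre_ makes it succeed)
  let ip_octets : List Int :=
    (PySem.Chars.splitOn ip_address.toList ['.']).map (fun s => (PySem.Int.ofChars? s).getD 0)
  -- ip_bin = ''.join(f"{octet:08b}" for octet in ip_octets)
  let ip_bin : List Char := (ip_octets.map fmt08b).flatten
  -- prefix_length = int(cidr_mask.replace('/', ''))  (guarded)
  let prefix_length : Int := (PySem.Int.ofStr? (PySem.Str.replace cidr_mask "/" "")).getD 0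
  -- mask_bin = '1' * prefix_length + '0' * (32 - prefix_length)   ('s' * k is '' for k < 0: toNat)
  let mask_bin : List Char :=
    List.replicate prefix_length.toNat '1' ++ List.replicate (32 - prefix_length).toNat '0'
  -- result_bin = bin(int(ip_bin, 2) & int(mask_bin, 2))[2:]
  let result_nat : Nat := parseBin ip_bin &&& parseBin mask_bin
  -- while len(result_bin) < 32: result_bin = '0' + result_bin
  let result_bin : List Char := padLoop (natBin result_nat)
  -- result_octets = [str(int(result_bin[i:i+8], 2)) for i in range(0, 32, 8)]
  let result_octets : List String :=
    (PySem.List.pyRange 0 32 8).map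
      (fun i => PySem.Int.toStr (Int.ofNat (parseBin (PySem.List.slice result_bin (some i) (some (i + 8))))))
  -- return '.'.join(result_octets)
  PySem.Str.join "." result_octets

-- ===== PORT B =====
def bitwise_multiply_ip_and_mask_alt (ip_address : String) (cidr_mask : String) : String :=
  -- value = 0; for o in ip_address.split('.'): value = value * 256 + int(o)   (int() guarded)
  let octets : List Int :=
    (PySem.Chars.splitOn ip_address.toList ['.']).map (fun s => (PySem.Int.ofChars? s).getD 0)
  let value0 : Int := octets.foldl (fun acc o => acc * 256 + o) 0
  -- prefix = int(cidr_mask.replace('/', ''))  (guarded)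
  let pfx : Int := (PySem.Int.ofStr? (PySem.Str.replace cidr_mask "/" "")).getD 0
  -- value %= 2 ** 32
  let value1 : Int := PySem.Int.mod value0 (2 ^ 32)
  let low : Int := 32 - pfx
  -- if low >= 32: value = 0   elif low > 0: value -= value % 2 ** low
  -- (in the elif branch 0 < low < 32, so `2 ** low` is ported exactly as 2 ^ low.toNat)
  let value2 : Int :=
    if low ≥ 32 then 0
    else if low > 0 then value1 - PySem.Int.mod value1 (2 ^ low.toNat)
    else value1
  -- '.'.join(str(value // 2 ** s % 256) for s in (24, 16, 8, 0))
  PySem.Str.join "."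
    (([24, 16, 8, 0] : List Nat).map
      (fun s => PySem.Int.toStr (PySem.Int.mod (PySem.Int.floordiv value2 (2 ^ s)) 256)))

-- ===== PRECONDITION & SPEC =====
-- Pre_ excludes (a) the inputs on which A raises ValueError (an octet or the de-slashed mask
-- that int() cannot parse, and negative octets, whose '-' sign makes int(ip_bin, 2) fail), and
-- (b) two corners outside the documented "a.b.c.d" + "/n" format on which A still returns but
-- neither value is specified: an octet above 255 (its binary text is wider than 8 bits, so the
-- concatenated bit string is no longer base-256 positional), and more than four octets combined
-- with a prefix above 32 (the AND result then exceeds 32 bits and only its top bits are shown).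
def Pre_bitwise_multiply_ip_and_mask (ip_address : String) (cidr_mask : String) : Prop :=
  (∀ s ∈ PySem.Chars.splitOn ip_address.toList ['.'],
      0 ≤ (PySem.Int.ofChars? s).getD (-1) ∧ (PySem.Int.ofChars? s).getD (-1) ≤ 255) ∧
  (PySem.Int.ofStr? (PySem.Str.replace cidr_mask "/" "")).isSome = true ∧
  ((PySem.Int.ofStr? (PySem.Str.replace cidr_mask "/" "")).getD 0 ≤ 32 ∨
    (PySem.Chars.splitOn ip_address.toList ['.']).length ≤ 4)
instance (ip_address : String) (cidr_mask : String) : Decidable (Pre_bitwise_multiply_ip_and_mask ip_address cidr_mask) := by unfold Pre_bitwise_multiply_ip_and_mask; infer_instance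

def pvWitness_bitwise_multiply_ip_and_mask : String × String := ("192.168.1.77", "/24")

def Spec_bitwise_multiply_ip_and_mask (ip_address : String) (cidr_mask : String) (out : String) : Prop := out = bitwise_multiply_ip_and_mask_alt ip_address cidr_mask
instance (ip_address : String) (cidr_mask : String) (out : String) : Decidable (Spec_bitwise_multiply_ip_and_mask ip_address cidr_mask out) := by unfold Spec_bitwise_multiply_ip_and_mask; infer_instance

-- ===== CLAIM (what is proved, stated in full; the proofs are below) =====
def Claim_equal_bitwise_multiply_ip_and_mask : Prop := ∀ (ip_address : String) (cidr_mask : String), Dom_bitwise_multiply_ip_and_mask ip_address cidr_mask → Pre_bitwise_multiply_ip_and_mask ip_address cidr_mask → Spec_bitwise_multiply_ip_and_mask ip_address cidr_mask (bitwise_multiply_ip_and_mask ip_address cidr_mask)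

-- ===== LEMMAS AND PROOFS =====

def pvBinary (cs : List Char) : Prop := ∀ c ∈ cs, c = '0' ∨ c = '1'

theorem parseBin_foldl_init (cs : List Char) (a : Nat) :
    cs.foldl (fun a c => 2 * a + (if c = '1' then 1 else 0)) a
      = a * 2 ^ cs.length + parseBin cs := by
  induction cs generalizing a with
  | nil => simp [parseBin]
  | cons c cs ih =>
    simp only [List.foldl_cons, List.length_cons, parseBin]
    rw [ih, ih (2 * 0 + _)]
    ring

theorem parseBin_append (s t : List Char) :
    parseBin (s ++ t) = parseBin s * 2 ^ t.length + parseBin t := by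
  unfold parseBin
  rw [List.foldl_append, parseBin_foldl_init]
  rfl

theorem parseBin_cons (c : Char) (s : List Char) :
    parseBin (c :: s) = (if c = '1' then 1 else 0) * 2 ^ s.length + parseBin s := by
  have := parseBin_append [c] s
  simpa [parseBin] using this

theorem parseBin_lt (cs : List Char) (h : pvBinary cs) : parseBin cs < 2 ^ cs.length := by
  induction cs with
  | nil => simp [parseBin]
  | cons c cs ih =>
    have hc := h c (by simp)
    have ht : pvBinary cs := fun x hx => h x (by simp [hx])
    have := ih ht
    rw [parseBin_cons]
    rcases hc with hc | hc <;> simp [hc, List.length_cons, pow_succ] <;> omega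

theorem parseBin_replicate_zero (k : Nat) : parseBin (List.replicate k '0') = 0 := by
  induction k with
  | zero => rfl
  | succ k ih => rw [List.replicate_succ, parseBin_cons]; simpa using ih

theorem parseBin_replicate_one (k : Nat) : parseBin (List.replicate k '1') = 2 ^ k - 1 := by
  induction k with
  | zero => rfl
  | succ k ih =>
    rw [List.replicate_succ, parseBin_cons, ih]
    have : 1 ≤ 2 ^ k := Nat.one_le_two_pow
    simp [List.length_replicate, pow_succ]
    omega

theorem parseBin_pad (k : Nat) (s : List Char) :
    parseBin (List.replicate k '0' ++ s) = parseBin s := by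
  rw [parseBin_append, parseBin_replicate_zero]
  simp

theorem natBin_binary (n : Nat) : pvBinary (natBin n) := by
  intro c hc
  induction n using Nat.strong_induction_on with
  | _ n ih =>
    rw [natBin] at hc
    split at hc
    · rcases List.mem_singleton.mp hc with h
      subst h
      split <;> simp
    · rcases List.mem_append.mp hc with h | h
      · exact ih (n / 2) (Nat.div_lt_self (by omega) (by omega)) h
      · rcases List.mem_singleton.mp h with h
        subst h
        split <;> simp

theorem parseBin_natBin (n : Nat) : parseBin (natBin n) = n := by
  induction n using Nat.strong_induction_on with
  | _ n ih =>
    rw [natBin]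
    split
    · have h2 : n = 0 ∨ n = 1 := by omega
      rcases h2 with h | h <;> subst h <;> rfl
    · rw [parseBin_append, ih (n / 2) (Nat.div_lt_self (by omega) (by omega))]
      rcases Nat.mod_two_eq_zero_or_one n with h | h <;> simp [h, parseBin] <;> omega

theorem natBin_length_le (n k : Nat) (hk : 1 ≤ k) (h : n < 2 ^ k) : (natBin n).length ≤ k := by
  induction k generalizing n with
  | zero => omega
  | succ k ih =>
    rw [natBin]
    split
    · simp
    · rw [List.length_append]
      have h2 : n / 2 < 2 ^ k := by
        have : 2 ^ (k + 1) = 2 ^ k * 2 := by ring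
        omega
      have hk1 : 1 ≤ k := by
        by_contra hk0
        interval_cases k <;> simp_all <;> omega
      have := ih (n / 2) hk1 h2
      simp
      omega

theorem padLoop_eq (k : Nat) : ∀ s : List Char, s.length + k = 32 →
    padLoop s = List.replicate k '0' ++ s := by
  induction k with
  | zero =>
    intro s hs
    rw [padLoop]
    simp [show ¬ s.length < 32 by omega]
  | succ k ih =>
    intro s hs
    rw [padLoop]
    simp only [show s.length < 32 by omega, dif_pos]
    rw [ih ('0' :: s) (by simp; omega)]
    rw [show ('0' :: s) = ['0'] ++ s from rfl, ← List.append_assoc, ← List.replicate_succ',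
      List.replicate_succ]

-- two equal-length binary strings with the same value are equal
theorem parseBin_inj (s : List Char) : ∀ t : List Char, pvBinary s → pvBinary t →
    s.length = t.length → parseBin s = parseBin t → s = t := by
  induction s with
  | nil => intro t _ _ hl _; cases t <;> simp_all
  | cons c s ih =>
    intro t hbs hbt hl hv
    cases t with
    | nil => simp at hl
    | cons d t =>
      have hlen : s.length = t.length := by simpa using hl
      have hcs : pvBinary s := fun x hx => hbs x (by simp [hx])
      have hct : pvBinary t := fun x hx => hbt x (by simp [hx])
      have hc := hbs c (by simp)
      have hd := hbt d (by simp)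
      rw [parseBin_cons, parseBin_cons, hlen] at hv
      have hs2 := parseBin_lt s hcs
      have ht2 := parseBin_lt t hct
      rw [hlen] at hs2
      have hcd : c = d ∧ parseBin s = parseBin t := by
        rcases hc with hc | hc <;> rcases hd with hd | hd <;>
          simp [hc, hd] at hv ⊢ <;> omega
      rw [hcd.1, ih t hcs hct hlen hcd.2]

def pad8 (n : Nat) : List Char := List.replicate (8 - (natBin n).length) '0' ++ natBin n

theorem pad8_length (n : Nat) (h : n < 256) : (pad8 n).length = 8 := by
  unfold pad8
  have := natBin_length_le n 8 (by omega) (by omega)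
  simp
  omega

theorem pad8_binary (n : Nat) : pvBinary (pad8 n) := by
  intro c hc
  rcases List.mem_append.mp hc with h | h
  · left; exact List.eq_of_mem_replicate h
  · exact natBin_binary n c h

theorem parseBin_pad8 (n : Nat) : parseBin (pad8 n) = n := by
  unfold pad8
  rw [parseBin_pad, parseBin_natBin]

-- the padded result splits into the four bytes of R
theorem padLoop_bytes (R : Nat) (hR : R < 2 ^ 32) :
    padLoop (natBin R)
      = pad8 (R / 2 ^ 24) ++ (pad8 (R / 2 ^ 16 % 256) ++ (pad8 (R / 2 ^ 8 % 256) ++ pad8 (R % 256))) := by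
  have hlenN : (natBin R).length ≤ 32 := natBin_length_le R 32 (by omega) hR
  have hb0 : R / 2 ^ 24 < 256 := by omega
  have hb1 : R / 2 ^ 16 % 256 < 256 := Nat.mod_lt _ (by norm_num)
  have hb2 : R / 2 ^ 8 % 256 < 256 := Nat.mod_lt _ (by norm_num)
  have hb3 : R % 256 < 256 := Nat.mod_lt _ (by norm_num)
  rw [padLoop_eq (32 - (natBin R).length) (natBin R) (by omega)]
  apply parseBin_inj
  · intro c hc
    rcases List.mem_append.mp hc with h | h
    · left; exact List.eq_of_mem_replicate h
    · exact natBin_binary R c h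
  · intro c hc
    simp only [List.mem_append] at hc
    rcases hc with h | h | h | h <;> exact pad8_binary _ c h
  · simp only [List.length_append, List.length_replicate,
      pad8_length _ hb0, pad8_length _ hb1, pad8_length _ hb2, pad8_length _ hb3]
    omega
  · rw [parseBin_pad, parseBin_natBin]
    rw [parseBin_append, parseBin_append, parseBin_append]
    simp only [List.length_append,
      pad8_length _ hb0, pad8_length _ hb1, pad8_length _ hb2, pad8_length _ hb3,
      parseBin_pad8]
    omega

-- AND with the high-ones mask '1'*a + '0'*b keeps bits b..a+b-1
theorem land_highmask (x a b : Nat) :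
    x &&& (2 ^ a - 1) * 2 ^ b = x % 2 ^ (a + b) / 2 ^ b * 2 ^ b := by
  have hmask : (2 ^ a - 1) * 2 ^ b = (2 ^ a - 1) <<< b := by rw [Nat.shiftLeft_eq]
  have hrhs : x % 2 ^ (a + b) / 2 ^ b * 2 ^ b = ((x % 2 ^ (a + b)) >>> b) <<< b := by
    rw [Nat.shiftRight_eq_div_pow, Nat.shiftLeft_eq]
  rw [hmask, hrhs]
  apply Nat.eq_of_testBit_eq
  intro i
  rw [Nat.testBit_land, Nat.testBit_shiftLeft, Nat.testBit_shiftLeft,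
    Nat.testBit_two_pow_sub_one, Nat.testBit_shiftRight, Nat.testBit_mod_two_pow]
  by_cases hbi : b ≤ i
  · have h1 : b + (i - b) = i := by omega
    rw [h1]
    by_cases hia : i - b < a
    · simp [hbi, show i < a + b by omega, hia]
    · simp [hia, show ¬ i < a + b by omega]
  · simp [show ¬ i ≥ b by omega]

theorem floordiv_ofNat (m k : Nat) : PySem.Int.floordiv (Int.ofNat m) (Int.ofNat k) = Int.ofNat (m / k) := by
  rcases m with _ | m
  · simp [PySem.Int.floordiv, Int.fdiv]
  · show Int.fdiv _ _ = _
    rw [show Int.fdiv (Int.ofNat (m + 1)) (Int.ofNat k) = (Int.ofNat (m + 1)) / (Int.ofNat k) from rfl]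
    exact (Int.natCast_div _ _).symm

theorem mod_ofNat (m k : Nat) : PySem.Int.mod (Int.ofNat m) (Int.ofNat k) = Int.ofNat (m % k) := by
  rcases m with _ | m
  · simp [PySem.Int.mod, Int.fmod]
  · show Int.fmod _ _ = _
    rw [show Int.fmod (Int.ofNat (m + 1)) (Int.ofNat k) = (Int.ofNat (m + 1)) % (Int.ofNat k) from rfl]
    exact (Int.natCast_mod _ _).symm

-- b // 2**s % 256 on the Int side is the byte on the Nat side
theorem byte_ofNat (R s : Nat) :
    PySem.Int.mod (PySem.Int.floordiv (Int.ofNat R) ((2 : Int) ^ s)) 256 = Int.ofNat (R / 2 ^ s % 256) := by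
  rw [show ((2 : Int) ^ s) = Int.ofNat (2 ^ s) by push_cast; rfl, floordiv_ofNat,
    show (256 : Int) = Int.ofNat 256 from rfl, mod_ofNat]

-- the base-256 value of an octet list, as both ports accumulate it
def valN (ns : List Nat) : Nat := ns.foldl (fun a n => a * 256 + n) 0

theorem valN_foldl_init (ns : List Nat) (m : Nat) :
    ns.foldl (fun a n => a * 256 + n) m = m * 256 ^ ns.length + valN ns := by
  induction ns generalizing m with
  | nil => simp [valN]
  | cons n ns ih =>
    simp only [List.foldl_cons, List.length_cons, valN] at *
    rw [ih, ih (0 * 256 + n)]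
    ring

theorem valN_lt (ns : List Nat) (h : ∀ n ∈ ns, n < 256) : valN ns < 256 ^ ns.length := by
  induction ns with
  | nil => simp [valN]
  | cons n ns ih =>
    have hn := h n (by simp)
    have := ih (fun x hx => h x (by simp [hx]))
    show (n :: ns).foldl (fun a n => a * 256 + n) 0 < _
    rw [List.foldl_cons, valN_foldl_init]
    simp only [List.length_cons, pow_succ]
    have h0 : (0 * 256 + n) * 256 ^ ns.length ≤ 255 * 256 ^ ns.length :=
      Nat.mul_le_mul_right _ (by omega)
    omega

theorem flatten_pad8_length (ns : List Nat) (h : ∀ n ∈ ns, n < 256) :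
    ((ns.map pad8).flatten).length = 8 * ns.length := by
  induction ns with
  | nil => simp
  | cons n ns ih =>
    simp only [List.map_cons, List.flatten_cons, List.length_append, List.length_cons,
      pad8_length _ (h n (by simp)), ih (fun x hx => h x (by simp [hx]))]
    ring

theorem parseBin_flatten_pad8 (ns : List Nat) (h : ∀ n ∈ ns, n < 256) :
    parseBin ((ns.map pad8).flatten) = valN ns := by
  induction ns with
  | nil => rfl
  | cons n ns ih =>
    have hrest : ∀ x ∈ ns, x < 256 := fun x hx => h x (by simp [hx])
    simp only [List.map_cons, List.flatten_cons]
    rw [parseBin_append, parseBin_pad8, ih hrest, flatten_pad8_length ns hrest]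
    show _ = (n :: ns).foldl (fun a n => a * 256 + n) 0
    rw [List.foldl_cons, valN_foldl_init]
    rw [show (2 : Nat) ^ (8 * ns.length) = 256 ^ ns.length by rw [pow_mul]; norm_num]
    ring

theorem foldl_int_ofNat (ns : List Nat) (m : Nat) :
    ((ns.map Int.ofNat).foldl (fun acc o => acc * 256 + o) (Int.ofNat m))
      = Int.ofNat (ns.foldl (fun a n => a * 256 + n) m) := by
  induction ns generalizing m with
  | nil => rfl
  | cons n ns ih =>
    simp only [List.map_cons, List.foldl_cons]
    rw [show (Int.ofNat m * 256 + Int.ofNat n) = Int.ofNat (m * 256 + n) by push_cast; rfl, ih]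

theorem foldl_int_zero (ns : List Nat) :
    ((ns.map Int.ofNat).foldl (fun acc o => acc * 256 + o) 0) = Int.ofNat (ns.foldl (fun a n => a * 256 + n) 0) := by
  rw [show (0 : Int) = Int.ofNat 0 from rfl, foldl_int_ofNat]

-- extract the parsed octet list from the precondition
theorem octets_of_pre (L : List (List Char))
    (h : ∀ s ∈ L, 0 ≤ (PySem.Int.ofChars? s).getD (-1) ∧ (PySem.Int.ofChars? s).getD (-1) ≤ 255) :
    ∃ ns : List Nat, L.map (fun s => (PySem.Int.ofChars? s).getD 0) = ns.map Int.ofNat ∧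
      (∀ n ∈ ns, n < 256) ∧ ns.length = L.length := by
  induction L with
  | nil => exact ⟨[], by simp⟩
  | cons s L ih =>
    obtain ⟨ns, h1, h2, h3⟩ := ih (fun x hx => h x (by simp [hx]))
    obtain ⟨h0, h255⟩ := h s (by simp)
    cases hv : PySem.Int.ofChars? s with
    | none => rw [hv] at h0; simp at h0
    | some v =>
      rw [hv] at h0 h255
      simp at h0 h255
      refine ⟨v.toNat :: ns, ?_, ?_, by simp [h3]⟩
      · simp only [List.map_cons, hv, Option.getD_some, h1, List.cons.injEq, and_true]
        simpa using (Int.toNat_of_nonneg h0).symm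
      · intro n hn
        rcases List.mem_cons.mp hn with hn | hn
        · omega
        · exact h2 n hn

theorem fmt08b_ofNat (n : Nat) : fmt08b (Int.ofNat n) = pad8 n := by
  simp [fmt08b, pad8]

theorem take8_append (A X : List Char) (hA : A.length = 8) : (A ++ X).take 8 = A := by
  rw [← hA, List.take_left]

theorem drop8_append (A X : List Char) (hA : A.length = 8) : (A ++ X).drop 8 = X := by
  rw [← hA, List.drop_left]

-- ===== VERDICT (by name: the statement is the Claim_ definition above) =====
set_option maxRecDepth 40000 in
set_option maxHeartbeats 2000000 in
theorem bitwise_multiply_ip_and_mask_spec : Claim_equal_bitwise_multiply_ip_and_mask := by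
  intro ip mask _ hpre
  obtain ⟨hoct, hmask, hdisj⟩ := hpre
  unfold Spec_bitwise_multiply_ip_and_mask
  obtain ⟨p, hp⟩ := Option.isSome_iff_exists.mp hmask
  rw [hp] at hdisj
  simp only [Option.getD_some] at hdisj
  obtain ⟨ns, hmapeq, hlt, hleneq⟩ := octets_of_pre _ hoct
  -- the shared integer value of the octets
  set N : Nat := valN ns with hN
  have hNlt : N < 256 ^ ns.length := valN_lt ns hlt
  set w : Nat := N % 2 ^ 32 with hw
  have hw32 : w < 2 ^ 32 := Nat.mod_lt _ (by norm_num)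
  -- the value both ports mask down to
  set R : Nat := w / 2 ^ (32 - p).toNat * 2 ^ (32 - p).toNat with hR
  have hR32 : R < 2 ^ 32 := lt_of_le_of_lt (Nat.div_mul_le_self w _) hw32
  have hr0 : R / 2 ^ 24 < 256 := by omega
  have hr1 : R / 2 ^ 16 % 256 < 256 := Nat.mod_lt _ (by norm_num)
  have hr2 : R / 2 ^ 8 % 256 < 256 := Nat.mod_lt _ (by norm_num)
  have hr3 : R % 256 < 256 := Nat.mod_lt _ (by norm_num)
  -- A's AND equals R
  have hRR : N % 2 ^ (p.toNat + (32 - p).toNat) / 2 ^ (32 - p).toNat * 2 ^ (32 - p).toNat = R := by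
    rcases lt_trichotomy p 0 with hpc | hpc | hpc
    · -- p < 0 : both sides are 0
      have ha : p.toNat = 0 := by omega
      have hb32 : 32 ≤ (32 - p).toNat := by omega
      have h1 : N % 2 ^ (32 - p).toNat < 2 ^ (32 - p).toNat := Nat.mod_lt _ (Nat.two_pow_pos _)
      have h2 : w < 2 ^ (32 - p).toNat :=
        lt_of_lt_of_le hw32 (Nat.pow_le_pow_right (by omega) hb32)
      rw [ha, Nat.zero_add, Nat.div_eq_of_lt h1, hR, Nat.div_eq_of_lt h2]
    · -- p = 0
      subst hpc
      rfl
    · rcases le_or_gt p 32 with hp32 | hp32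
      · -- 0 < p ≤ 32 : the exponent is exactly 32
        rw [show p.toNat + (32 - p).toNat = 32 by omega]
      · -- p > 32 : Pre_ forces at most 4 octets, so N < 2^32 and nothing is cut
        have hk4 : ns.length ≤ 4 := by
          rcases hdisj with h | h
          · omega
          · omega
        have hN32 : N < 2 ^ 32 := by
          calc N < 256 ^ ns.length := hNlt
          _ ≤ 256 ^ 4 := Nat.pow_le_pow_right (by omega) hk4
          _ = 2 ^ 32 := by norm_num
        have hb0 : (32 - p).toNat = 0 := by omega
        rw [hb0, Nat.add_zero, pow_zero, Nat.div_one, Nat.mul_one,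
          Nat.mod_eq_of_lt (lt_of_lt_of_le hN32 (Nat.pow_le_pow_right (by omega) (by omega : 32 ≤ p.toNat))),
          hR, hb0, pow_zero, Nat.div_one, Nat.mul_one, hw, Nat.mod_eq_of_lt hN32]
    -- (trichotomy cases end)
  have hbytes := padLoop_bytes R hR32
  have hrange : PySem.List.pyRange 0 32 8 = [0, 8, 16, 24] := by decide
  -- unfold both ports
  simp only [bitwise_multiply_ip_and_mask, bitwise_multiply_ip_and_mask_alt, hp, hmapeq,
    List.map_cons, List.map_nil, List.map_map, Option.getD_some, hrange]
  rw [show ((fun s => fmt08b s) ∘ Int.ofNat) = pad8 by funext n; exact fmt08b_ofNat n]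
  rw [parseBin_flatten_pad8 ns hlt, ← hN]
  have hMeq : parseBin (List.replicate p.toNat '1' ++ List.replicate (32 - p).toNat '0')
      = (2 ^ p.toNat - 1) * 2 ^ (32 - p).toNat := by
    rw [parseBin_append, parseBin_replicate_one, parseBin_replicate_zero, List.length_replicate]
    omega
  rw [hMeq, land_highmask, hRR, hbytes]
  -- compute the four slices
  have hsl0 : PySem.List.slice (pad8 (R / 2 ^ 24) ++ (pad8 (R / 2 ^ 16 % 256) ++ (pad8 (R / 2 ^ 8 % 256) ++ pad8 (R % 256)))) (some 0) (some (0 + 8)) = pad8 (R / 2 ^ 24) := by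
    rw [PySem.List.slice_toNat _ (by norm_num) (by norm_num),
      show ((0:Int) + 8).toNat - (0:Int).toNat = 8 from rfl,
      show ((0:Int)).toNat = 0 from rfl, List.drop_zero,
      take8_append _ _ (pad8_length _ hr0)]
  have hsl1 : PySem.List.slice (pad8 (R / 2 ^ 24) ++ (pad8 (R / 2 ^ 16 % 256) ++ (pad8 (R / 2 ^ 8 % 256) ++ pad8 (R % 256)))) (some 8) (some (8 + 8)) = pad8 (R / 2 ^ 16 % 256) := by
    rw [PySem.List.slice_toNat _ (by norm_num) (by norm_num),
      show ((8:Int) + 8).toNat - (8:Int).toNat = 8 from rfl,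
      show ((8:Int)).toNat = 8 from rfl,
      drop8_append _ _ (pad8_length _ hr0), take8_append _ _ (pad8_length _ hr1)]
  have hsl2 : PySem.List.slice (pad8 (R / 2 ^ 24) ++ (pad8 (R / 2 ^ 16 % 256) ++ (pad8 (R / 2 ^ 8 % 256) ++ pad8 (R % 256)))) (some 16) (some (16 + 8)) = pad8 (R / 2 ^ 8 % 256) := by
    rw [PySem.List.slice_toNat _ (by norm_num) (by norm_num),
      show ((16:Int) + 8).toNat - (16:Int).toNat = 8 from rfl,
      show ((16:Int)).toNat = 16 from rfl]
    rw [show (16 : Nat) = 8 + 8 from rfl, ← List.drop_drop,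
      drop8_append _ _ (pad8_length _ hr0), drop8_append _ _ (pad8_length _ hr1),
      take8_append _ _ (pad8_length _ hr2)]
  have hsl3 : PySem.List.slice (pad8 (R / 2 ^ 24) ++ (pad8 (R / 2 ^ 16 % 256) ++ (pad8 (R / 2 ^ 8 % 256) ++ pad8 (R % 256)))) (some 24) (some (24 + 8)) = pad8 (R % 256) := by
    rw [PySem.List.slice_toNat _ (by norm_num) (by norm_num),
      show ((24:Int) + 8).toNat - (24:Int).toNat = 8 from rfl,
      show ((24:Int)).toNat = 24 from rfl]
    rw [show (24 : Nat) = 8 + (8 + 8) from rfl, ← List.drop_drop, ← List.drop_drop,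
      drop8_append _ _ (pad8_length _ hr0), drop8_append _ _ (pad8_length _ hr1),
      drop8_append _ _ (pad8_length _ hr2), List.take_of_length_le (by simp [pad8_length _ hr3])]
  rw [hsl0, hsl1, hsl2, hsl3, parseBin_pad8, parseBin_pad8, parseBin_pad8, parseBin_pad8]
  -- B's masked value equals R
  rw [foldl_int_zero, show List.foldl (fun a n => a * 256 + n) 0 ns = N from hN.symm,
    show ((2 : Int) ^ 32) = Int.ofNat (2 ^ 32) by norm_num, mod_ofNat,
    show N % 2 ^ 32 = w from hw.symm]
  have hval2 : (if (32 - p ≥ 32) then (0 : Int)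
      else if (32 - p > 0) then Int.ofNat w - PySem.Int.mod (Int.ofNat w) (2 ^ (32 - p).toNat)
      else Int.ofNat w) = Int.ofNat R := by
    have hdm := Nat.div_add_mod w (2 ^ (32 - p).toNat)
    rcases le_or_gt p 0 with hpc | hpc
    · rw [if_pos (by omega)]
      have h2 : w < 2 ^ (32 - p).toNat :=
        lt_of_lt_of_le hw32 (Nat.pow_le_pow_right (by omega) (by omega))
      rw [hR, Nat.div_eq_of_lt h2]
      simp
    · rcases lt_or_ge p 32 with hp32 | hp32
      · rw [if_neg (by omega), if_pos (by omega),
          show ((2 : Int) ^ (32 - p).toNat) = Int.ofNat (2 ^ (32 - p).toNat) by norm_num,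
          mod_ofNat]
        have hsub : w - w % 2 ^ (32 - p).toNat = R :=
          Nat.sub_eq_of_eq_add (by rw [hR, Nat.mul_comm]; exact hdm.symm)
        simp only [Int.ofNat_eq_natCast]
        rw [← hsub]
        omega
      · rw [if_neg (by omega), if_neg (by omega)]
        congr 1
        rw [hR, show (32 - p).toNat = 0 by omega, pow_zero, Nat.div_one, Nat.mul_one]
  rw [hval2]
  -- per-byte equality
  rw [byte_ofNat, byte_ofNat, byte_ofNat, byte_ofNat]
  rw [show R / 2 ^ 0 % 256 = R % 256 by rw [pow_zero, Nat.div_one],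
    show R / 2 ^ 24 % 256 = R / 2 ^ 24 from Nat.mod_eq_of_lt hr0]
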